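-- pv_equiv track=rewrite | github.com/LucasAMoreira/AtomCG | src/util_atomo.py | retornaCamadas
-- ===== SOURCE A (Python) =====
-- def retornaCamadas(n):
--
-- 	numEletrons = [0,0,0,0,0,0,0]
--
-- 	i=0
-- 	while i<n:
-- 		if i<2:# Camada K (máx 2)
-- 			numEletrons[0]=numEletrons[0]+1
-- 		if i>=2 and i<10:# Camada L (máx 8)
-- 			numEletrons[1]=numEletrons[1]+1
-- 		if i>=10 and i<26:# Camada M (máx 18)
-- 			numEletrons[2]=numEletrons[2]+1
-- 		if i>=26 and i<50:# Camada N (máx 32)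
-- 			numEletrons[3]=numEletrons[3]+1
--
-- 		if i>=50 and i<82:# Camada O (máx 32)
-- 			numEletrons[4]=numEletrons[4]+1
-- 		if i>=82 and i<100:# Camada P (máx 18)
-- 			numEletrons[5]=numEletrons[5]+1
-- 		if i>=100 and i<108:# Camada Q (máx 8)
-- 			numEletrons[6]=numEletrons[6]+1
--
-- 		i=i+1
-- 	return numEletrons;
-- ===== SOURCE B (Python) =====
-- def retornaCamadas(n):
--     # closed form: shell k (range [s, s+w)) holds min(max(n - s, 0), w) electrons
--     bounds = [(0, 2), (2, 8), (10, 16), (26, 24), (50, 32), (82, 18), (100, 8)]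
--     return [min(max(n - s, 0), w) for s, w in bounds]
-- ===== Notes on version B (the rewrite author's own statement) =====
-- stated objective: faster
-- what changed: Replaces the per-electron while loop with a closed-form clamp min(max(n-start,0),width) per shell.
import Mathlib
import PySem

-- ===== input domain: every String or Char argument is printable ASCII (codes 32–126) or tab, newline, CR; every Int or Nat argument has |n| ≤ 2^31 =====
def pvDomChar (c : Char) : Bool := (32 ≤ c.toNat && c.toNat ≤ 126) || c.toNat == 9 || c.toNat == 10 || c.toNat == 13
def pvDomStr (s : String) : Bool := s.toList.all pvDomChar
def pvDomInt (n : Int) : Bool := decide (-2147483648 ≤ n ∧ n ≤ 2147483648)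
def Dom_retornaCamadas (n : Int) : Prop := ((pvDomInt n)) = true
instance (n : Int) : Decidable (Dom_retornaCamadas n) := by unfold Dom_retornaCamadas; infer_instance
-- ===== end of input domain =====

-- B replaces A's per-electron while loop with a closed-form clamp per shell (O(1) vs O(n)).


-- ===== PORT A =====
-- the while loop, state = the seven list cells; decreases on (n - i).toNat
def retornaCamadasLoop (n i e0 e1 e2 e3 e4 e5 e6 : Int) : List Int :=
  if h : i < n then
    retornaCamadasLoop n (i + 1)
      (if i < 2 then e0 + 1 else e0)
      (if 2 ≤ i ∧ i < 10 then e1 + 1 else e1)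
      (if 10 ≤ i ∧ i < 26 then e2 + 1 else e2)
      (if 26 ≤ i ∧ i < 50 then e3 + 1 else e3)
      (if 50 ≤ i ∧ i < 82 then e4 + 1 else e4)
      (if 82 ≤ i ∧ i < 100 then e5 + 1 else e5)
      (if 100 ≤ i ∧ i < 108 then e6 + 1 else e6)
  else [e0, e1, e2, e3, e4, e5, e6]
termination_by (n - i).toNat
decreasing_by omega

def retornaCamadas (n : Int) : List Int :=
  retornaCamadasLoop n 0 0 0 0 0 0 0 0

-- ===== PORT B =====
def retornaCamadas_alt (n : Int) : List Int :=
  [((0:Int), (2:Int)), (2, 8), (10, 16), (26, 24), (50, 32), (82, 18), (100, 8)].map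
    (fun p => min (max (n - p.1) 0) p.2)

-- ===== PRECONDITION & SPEC =====
def Spec_retornaCamadas (n : Int) (out : List Int) : Prop := out = retornaCamadas_alt n
instance (n : Int) (out : List Int) : Decidable (Spec_retornaCamadas n out) := by unfold Spec_retornaCamadas; infer_instance

-- ===== CLAIM (what is proved, stated in full; the proofs are below) =====
def Claim_equal_retornaCamadas : Prop := ∀ (n : Int), Dom_retornaCamadas n → Spec_retornaCamadas n (retornaCamadas n)

-- ===== LEMMAS AND PROOFS =====
-- clamped count of electrons in [s, s+w) among the first i
def pvClamp (i s w : Int) : Int := min (max (i - s) 0) w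

-- loop invariant: starting at 0 ≤ i with each cell holding its clamp at i,
-- the loop returns the clamps at max i n
theorem retornaCamadasLoop_inv (n i : Int) (hi : 0 ≤ i) :
    retornaCamadasLoop n i (pvClamp i 0 2) (pvClamp i 2 8) (pvClamp i 10 16)
      (pvClamp i 26 24) (pvClamp i 50 32) (pvClamp i 82 18) (pvClamp i 100 8)
    = [pvClamp (max i n) 0 2, pvClamp (max i n) 2 8, pvClamp (max i n) 10 16,
       pvClamp (max i n) 26 24, pvClamp (max i n) 50 32, pvClamp (max i n) 82 18,
       pvClamp (max i n) 100 8] := by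
  rw [retornaCamadasLoop]
  split
  · rename_i h
    have h0 : (if i < 2 then pvClamp i 0 2 + 1 else pvClamp i 0 2) = pvClamp (i+1) 0 2 := by
      unfold pvClamp; split <;> omega
    have h1 : (if 2 ≤ i ∧ i < 10 then pvClamp i 2 8 + 1 else pvClamp i 2 8) = pvClamp (i+1) 2 8 := by
      unfold pvClamp; split <;> omega
    have h2 : (if 10 ≤ i ∧ i < 26 then pvClamp i 10 16 + 1 else pvClamp i 10 16) = pvClamp (i+1) 10 16 := by
      unfold pvClamp; split <;> omega
    have h3 : (if 26 ≤ i ∧ i < 50 then pvClamp i 26 24 + 1 else pvClamp i 26 24) = pvClamp (i+1) 26 24 := by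
      unfold pvClamp; split <;> omega
    have h4 : (if 50 ≤ i ∧ i < 82 then pvClamp i 50 32 + 1 else pvClamp i 50 32) = pvClamp (i+1) 50 32 := by
      unfold pvClamp; split <;> omega
    have h5 : (if 82 ≤ i ∧ i < 100 then pvClamp i 82 18 + 1 else pvClamp i 82 18) = pvClamp (i+1) 82 18 := by
      unfold pvClamp; split <;> omega
    have h6 : (if 100 ≤ i ∧ i < 108 then pvClamp i 100 8 + 1 else pvClamp i 100 8) = pvClamp (i+1) 100 8 := by
      unfold pvClamp; split <;> omega
    rw [h0, h1, h2, h3, h4, h5, h6, retornaCamadasLoop_inv n (i+1) (by omega)]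
    have : max (i+1) n = max i n := by omega
    rw [this]
  · have : max i n = i := by omega
    rw [this]
termination_by (n - i).toNat
decreasing_by omega

-- ===== VERDICT (by name: the statement is the Claim_ definition above) =====
theorem retornaCamadas_spec : Claim_equal_retornaCamadas := by
  intro n _
  unfold Spec_retornaCamadas retornaCamadas
  have h := retornaCamadasLoop_inv n 0 le_rfl
  simp only [pvClamp] at h
  norm_num at h
  rw [h]
  simp only [retornaCamadas_alt, List.map_cons, List.map_nil, List.cons.injEq, and_true]
  and_intros <;> omega
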